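-- pv_equiv track=rewrite | github.com/cabell365/Python | games/slot_machine.py | get_duplicate_winnings
-- ===== SOURCE A (Python) =====
-- def get_duplicate_winnings(slot_symbols):
--
--     winnings = 0
--
--     # Check for duplicates. Get 2 of a kind, get 5 credits
--     for slot_symbol in slot_symbols:
--         if len(slot_symbols) == len(set(slot_symbols)):
--             winnings = 0
--         else:
--             winnings = 5
--
--     # If any value is a Lemon then no winnings
--     for slot_symbol in slot_symbols:
--         if slot_symbol == "LEMON":
--             winnings = 0
--
--     return winnings
-- ===== SOURCE B (Python) =====
-- def get_duplicate_winnings(slot_symbols):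
--     s = sorted(slot_symbols)
--     dup = any(a == b for a, b in zip(s, s[1:]))
--     return 5 if dup and "LEMON" not in s else 0
-- ===== Notes on version B (the rewrite author's own statement) =====
-- stated objective: faster
-- what changed: Replaces A's two accumulator loops (each iteration recomputing len(set(slot_symbols))) by a single sort followed by one adjacent-pair scan for a duplicate plus a membership test for LEMON, returning 5 or 0 directly.
import Mathlib
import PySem

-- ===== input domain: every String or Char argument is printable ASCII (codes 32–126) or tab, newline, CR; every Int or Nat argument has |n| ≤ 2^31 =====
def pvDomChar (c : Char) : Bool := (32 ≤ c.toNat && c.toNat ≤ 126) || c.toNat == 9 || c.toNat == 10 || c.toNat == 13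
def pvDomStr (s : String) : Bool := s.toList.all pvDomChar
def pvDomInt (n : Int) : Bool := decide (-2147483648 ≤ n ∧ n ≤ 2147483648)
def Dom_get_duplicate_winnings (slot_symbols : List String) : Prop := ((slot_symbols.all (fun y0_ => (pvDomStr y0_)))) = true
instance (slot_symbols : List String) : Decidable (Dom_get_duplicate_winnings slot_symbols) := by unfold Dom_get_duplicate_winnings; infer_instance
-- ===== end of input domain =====

-- B replaces A's per-iteration len(set(...)) duplicate test by sort-then-adjacent-scan (objective: simpler).

-- ===== PORT A =====
def get_duplicate_winnings (slot_symbols : List String) : Int :=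
  let winnings : Int := 0
  -- first loop: for slot_symbol in slot_symbols: winnings = 0 if len == len(set) else 5
  let winnings := slot_symbols.foldl
    (fun _winnings _slot_symbol =>
      if (slot_symbols.length : Int) = PySem.Set.len (PySem.Set.ofList slot_symbols) then (0 : Int) else 5)
    winnings
  -- second loop: for slot_symbol in slot_symbols: if slot_symbol == "LEMON": winnings = 0
  let winnings := slot_symbols.foldl
    (fun winnings slot_symbol => if slot_symbol == "LEMON" then (0 : Int) else winnings)
    winnings
  winnings

-- ===== PORT B =====
def get_duplicate_winnings_alt (slot_symbols : List String) : Int :=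
  let s := PySem.List.sorted slot_symbols (fun x => x) false
  let dup := (s.zip s.tail).any (fun p => p.1 == p.2)
  if dup && !(s.contains "LEMON") then 5 else 0

-- ===== PRECONDITION & SPEC =====
def Spec_get_duplicate_winnings (slot_symbols : List String) (out : Int) : Prop := out = get_duplicate_winnings_alt slot_symbols
instance (slot_symbols : List String) (out : Int) : Decidable (Spec_get_duplicate_winnings slot_symbols out) := by unfold Spec_get_duplicate_winnings; infer_instance

-- ===== CLAIM (what is proved, stated in full; the proofs are below) =====
def Claim_equal_get_duplicate_winnings : Prop := ∀ (slot_symbols : List String), Dom_get_duplicate_winnings slot_symbols → Spec_get_duplicate_winnings slot_symbols (get_duplicate_winnings slot_symbols)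

-- ===== LEMMAS AND PROOFS =====

-- A's first loop writes a value that does not depend on the loop variable or accumulator.
theorem foldl_const_int (xs : List String) (c w : Int) :
    xs.foldl (fun _ _ => c) w = if xs = [] then w else c := by
  induction xs generalizing w with
  | nil => simp
  | cons a t ih => simp [List.foldl, ih]

-- A's second loop zeroes the accumulator iff "LEMON" occurs.
theorem foldl_lemon (xs : List String) (w : Int) :
    xs.foldl (fun winnings s => if s == "LEMON" then (0 : Int) else winnings) w
      = if xs.contains "LEMON" then 0 else w := by
  induction xs generalizing w with
  | nil => simp
  | cons a t ih =>
      simp only [List.foldl, ih, List.contains_cons]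
      by_cases h : a = "LEMON"
      · simp [h]
      · simp [h, Ne.symm h]

-- PySem.List.dedup keeps the length exactly when the list has no duplicates.
theorem length_dedup_eq_iff (xs : List String) :
    (PySem.List.dedup xs).length = xs.length ↔ xs.Nodup := by
  have hperm : (PySem.List.dedup xs).Perm xs.dedup :=
    (List.perm_ext_iff_of_nodup (PySem.List.nodup_dedup xs) xs.nodup_dedup).mpr
      (fun a => by simp [List.mem_dedup])
  rw [hperm.length_eq]
  constructor
  · intro h
    have := List.Sublist.eq_of_length xs.dedup_sublist h
    rw [← this]; exact xs.nodup_dedup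
  · intro h; rw [List.dedup_eq_self.mpr h]

-- In a ≤-sorted list, some adjacent pair is equal iff the list has a duplicate.
theorem adj_dup_iff (l : List String) (hp : l.Pairwise (fun a b => a ≤ b)) :
    ((l.zip l.tail).any (fun p => p.1 == p.2) = true) ↔ ¬ l.Nodup := by
  induction l with
  | nil => simp
  | cons a t ih =>
      cases t with
      | nil => simp
      | cons b u =>
          rcases List.pairwise_cons.mp hp with ⟨h1, h2⟩
          have ihs := ih h2
          by_cases hab : a = b
          · subst hab
            simp [List.nodup_cons]
          · have hab' : a < b := lt_of_le_of_ne (h1 b (by simp)) hab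
            have hnotin : a ∉ b :: u := by
              intro hmem
              rcases List.mem_cons.mp hmem with h | h
              · exact hab h
              · have hb : b ≤ a := (List.pairwise_cons.mp h2).1 a h
                exact absurd hab' (not_lt.mpr hb)
            have habf : (a == b) = false := beq_eq_false_iff_ne.mpr hab
            simp only [List.tail_cons, List.zip_cons_cons, List.any_cons, habf, Bool.false_or]
            simp only [List.tail_cons] at ihs
            rw [ihs]
            simp [List.nodup_cons, hnotin]

-- ===== VERDICT (by name: the statement is the Claim_ definition above) =====
theorem get_duplicate_winnings_spec : Claim_equal_get_duplicate_winnings := by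
  intro xs _
  unfold Spec_get_duplicate_winnings get_duplicate_winnings get_duplicate_winnings_alt
  simp only []
  rw [foldl_lemon, foldl_const_int]
  set s := PySem.List.sorted xs (fun x => x) false with hs
  have hperm : s.Perm xs := PySem.List.sorted_perm xs (fun x => x) false
  have hadj : ((s.zip s.tail).any (fun p => p.1 == p.2) = true) ↔ ¬ s.Nodup :=
    adj_dup_iff s (PySem.List.sorted_pairwise xs (fun x => x))
  have hnodup : s.Nodup ↔ xs.Nodup := hperm.nodup_iff
  have hmem : s.contains "LEMON" = xs.contains "LEMON" := by
    simp [List.contains_eq_mem, hperm.mem_iff]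
  have hlen : xs.length = List.length (PySem.Set.ofList xs) ↔ xs.Nodup := by
    rw [← PySem.List.dedup_eq_ofList]
    exact ⟨fun h => (length_dedup_eq_iff xs).mp h.symm, fun h => ((length_dedup_eq_iff xs).mpr h).symm⟩
  by_cases hL : "LEMON" ∈ xs
  · simp [hL, hperm.mem_iff.mpr hL]
  · by_cases hN : xs.Nodup
    · have hdup : ((s.zip s.tail).any (fun p => p.1 == p.2)) = false := by
        rw [Bool.eq_false_iff, ne_eq, hadj]
        simp [hnodup, hN]
      by_cases he : xs = [] <;> simp [he, hL, hperm.mem_iff, hdup, hlen, hN]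
    · have hne : xs ≠ [] := by rintro rfl; exact hN List.nodup_nil
      have hdup : ((s.zip s.tail).any (fun p => p.1 == p.2)) = true := by
        rw [hadj, hnodup]; exact hN
      simp [hne, hL, hperm.mem_iff, hdup, hlen, hN]
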